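-- pv_equiv track=rewrite | github.com/PermutaTriangle/Tilings | alfur_sandbox/3_and_4_interleaved.py | all_sets_of_perms_of_set
-- ===== SOURCE A (Python) =====
-- def all_sets_of_perms_of_set(perms):
--     all_sets = []
--     all_perms = list(perms)
--     for i in range(2**len(all_perms)):
--         temp_set = []
--         my_count = 0
--         while i > 0:
--             if i % 2 == 1:
--                 temp_set.append(all_perms[my_count])
--             my_count += 1
--             i //= 2
--         all_sets.append(tuple(temp_set))
--     assert len(all_sets) == 2**len(all_perms)
--     return sorted(set(all_sets))
-- ===== SOURCE B (Python) =====
-- def all_sets_of_perms_of_set(perms):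
--     subsets = [()]
--     for p in perms:
--         subsets += [s + (p,) for s in subsets]
--     return sorted(set(subsets))
-- ===== Notes on version B (the rewrite author's own statement) =====
-- stated objective: simpler
-- what changed: A's per-index binary bit-decoding loop (decode each i in range(2**n) into the subset of set bit positions) is replaced by a single iterative power-set doubling fold (subsets += [s + (p,) for s in subsets] for each perm), keeping the final sorted(set(...)) step.
import Mathlib
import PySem

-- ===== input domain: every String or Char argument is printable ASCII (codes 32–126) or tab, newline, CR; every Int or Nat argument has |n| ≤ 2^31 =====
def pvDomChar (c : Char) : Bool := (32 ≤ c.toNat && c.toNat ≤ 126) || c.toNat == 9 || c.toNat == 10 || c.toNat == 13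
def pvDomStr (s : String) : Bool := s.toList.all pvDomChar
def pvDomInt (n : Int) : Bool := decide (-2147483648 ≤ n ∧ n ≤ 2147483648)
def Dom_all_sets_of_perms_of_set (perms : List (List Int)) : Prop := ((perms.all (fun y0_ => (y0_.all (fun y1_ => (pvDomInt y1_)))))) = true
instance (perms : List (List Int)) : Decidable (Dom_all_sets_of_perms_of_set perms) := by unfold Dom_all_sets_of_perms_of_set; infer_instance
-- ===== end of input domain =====

-- B replaces A's per-index bit-decoding inner loop by an iterative power-set doubling fold
-- (objective: simpler; return value only — neither version mutates its argument).

-- ===== PORT A =====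
-- the while-loop body of A: while i > 0: if i % 2 == 1: temp_set.append(all_perms[my_count]); my_count += 1; i //= 2.
-- i is a value of range(2**len), hence a nonnegative int, modelled as Nat (Python's % and // agree with Nat's on nonnegatives);
-- all_perms[my_count] is in range for every i < 2**len, so the total getD with default [] is exact there.
def pvDecodeA (all_perms : List (List Int)) (my_count : Nat) (i : Nat) : List (List Int) :=
  if _h : i = 0 then []
  else
    (if i % 2 = 1 then [all_perms.getD my_count []] else []) ++
      pvDecodeA all_perms (my_count + 1) (i / 2)
  termination_by i
  decreasing_by exact Nat.div_lt_self (Nat.pos_of_ne_zero _h) one_lt_two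

def all_sets_of_perms_of_set (perms : List (List Int)) : List (List (List Int)) :=
  let all_perms := perms
  let all_sets := (PySem.List.pyRange 0 ((2 ^ all_perms.length : Nat) : Int) 1).map
      (fun i => pvDecodeA all_perms 0 i.toNat)
  -- the assert len(all_sets) == 2**len(all_perms) always holds and is skipped
  PySem.List.sorted (PySem.Set.ofList all_sets) (fun x => x) false

-- ===== PORT B =====
def all_sets_of_perms_of_set_alt (perms : List (List Int)) : List (List (List Int)) :=
  let subsets := perms.foldl (fun acc p => acc ++ acc.map (fun s => s ++ [p])) [[]]
  PySem.List.sorted (PySem.Set.ofList subsets) (fun x => x) false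

-- ===== PRECONDITION & SPEC =====
def Spec_all_sets_of_perms_of_set (perms : List (List Int)) (out : List (List (List Int))) : Prop := out = all_sets_of_perms_of_set_alt perms
instance (perms : List (List Int)) (out : List (List (List Int))) : Decidable (Spec_all_sets_of_perms_of_set perms out) := by unfold Spec_all_sets_of_perms_of_set; infer_instance

-- ===== CLAIM (what is proved, stated in full; the proofs are below) =====
def Claim_equal_all_sets_of_perms_of_set : Prop := ∀ (perms : List (List Int)), Dom_all_sets_of_perms_of_set perms → Spec_all_sets_of_perms_of_set perms (all_sets_of_perms_of_set perms)

-- ===== LEMMAS AND PROOFS =====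

-- decoding only reads indices below c + m when i < 2^m, so a right extension of the list is invisible
theorem pvDecodeA_zero (L : List (List Int)) (c : Nat) : pvDecodeA L c 0 = [] := by
  rw [pvDecodeA]; rfl

theorem pvDecodeA_append (m : Nat) : ∀ (c j : Nat) (L L' : List (List Int)),
    j < 2 ^ m → c + m ≤ L.length → pvDecodeA (L ++ L') c j = pvDecodeA L c j := by
  induction m with
  | zero => intro c j L L' hj _; interval_cases j; simp [pvDecodeA_zero]
  | succ m ih =>
    intro c j L L' hj hc
    by_cases h0 : j = 0
    · subst h0; simp [pvDecodeA_zero]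
    · rw [pow_succ] at hj
      conv_lhs => rw [pvDecodeA]
      conv_rhs => rw [pvDecodeA]
      simp only [h0, dite_false]
      rw [ih (c + 1) (j / 2) L L' (by omega) (by omega)]
      have hcL : c < L.length := by omega
      congr 1
      split
      · rw [List.getD_append _ _ _ _ hcL]
      · rfl

-- adding the high bit 2^m appends the element at index c + m
theorem pvDecodeA_add_pow (m : Nat) : ∀ (c j : Nat) (L : List (List Int)),
    j < 2 ^ m → pvDecodeA L c (j + 2 ^ m) = pvDecodeA L c j ++ [L.getD (c + m) []] := by
  induction m with
  | zero =>
    intro c j L hj; interval_cases j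
    rw [show (0 : Nat) + 2 ^ 0 = 1 from rfl, pvDecodeA]
    simp [pvDecodeA_zero]
  | succ m ih =>
    intro c j L hj
    have h2 : 2 ^ (m + 1) = 2 * 2 ^ m := by ring
    rw [h2] at hj ⊢
    conv_lhs => rw [pvDecodeA]
    have hne : ¬ (j + 2 * 2 ^ m = 0) := by positivity
    simp only [hne, dite_false]
    have hmod : (j + 2 * 2 ^ m) % 2 = j % 2 := by omega
    have hdivs : (j + 2 * 2 ^ m) / 2 = j / 2 + 2 ^ m := by omega
    rw [hmod, hdivs, ih (c + 1) (j / 2) L (by omega)]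
    have hidx : c + 1 + m = c + (m + 1) := by omega
    by_cases h0 : j = 0
    · subst h0; simp [pvDecodeA_zero, hidx]
    · conv_rhs => rw [pvDecodeA]
      simp only [h0, dite_false, hidx, List.append_assoc]

-- the bit-decoded enumeration of range(2^n) IS the doubling fold
theorem pvEnum_eq_fold : ∀ (perms : List (List Int)),
    (List.range (2 ^ perms.length)).map (fun j => pvDecodeA perms 0 j)
      = perms.foldl (fun acc p => acc ++ acc.map (fun s => s ++ [p])) [[]] := by
  intro perms
  induction perms using List.reverseRecOn with
  | nil =>
    simp only [List.length_nil, pow_zero, List.range_one, List.map_cons, List.map_nil,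
      List.foldl_nil]
    rw [pvDecodeA_zero]
  | append_singleton L p ih =>
    have hlen : (L ++ [p]).length = L.length + 1 := by simp
    have h2 : 2 ^ (L.length + 1) = 2 ^ L.length + 2 ^ L.length := by ring
    rw [hlen, h2, List.range_add, List.map_append, List.foldl_append]
    have h1 : (List.range (2 ^ L.length)).map (fun j => pvDecodeA (L ++ [p]) 0 j)
        = L.foldl (fun acc p => acc ++ acc.map (fun s => s ++ [p])) [[]] := by
      rw [← ih]
      refine List.map_congr_left ?_
      intro j hj
      exact pvDecodeA_append L.length 0 j L [p] (List.mem_range.mp hj) (by omega)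
    have h3 : ((List.range (2 ^ L.length)).map (fun x => 2 ^ L.length + x)).map
          (fun j => pvDecodeA (L ++ [p]) 0 j)
        = ((List.range (2 ^ L.length)).map (fun j => pvDecodeA (L ++ [p]) 0 j)).map
            (fun s => s ++ [p]) := by
      rw [List.map_map, List.map_map]
      refine List.map_congr_left ?_
      intro j hj
      simp only [Function.comp_apply]
      rw [Nat.add_comm, pvDecodeA_add_pow L.length 0 j (L ++ [p]) (List.mem_range.mp hj)]
      simp
    rw [h3, h1, List.foldl_cons, List.foldl_nil]

-- ===== VERDICT (by name: the statement is the Claim_ definition above) =====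
theorem all_sets_of_perms_of_set_spec : Claim_equal_all_sets_of_perms_of_set := by
  intro perms _
  unfold Spec_all_sets_of_perms_of_set all_sets_of_perms_of_set all_sets_of_perms_of_set_alt
  simp only [PySem.List.pyRange_zero_natCast, List.map_map]
  rw [← pvEnum_eq_fold perms]
  congr 1
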